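-- pv_equiv track=rewrite | github.com/adam5644/HackerRank_Leetcode_and_SQL | HackerRank/Kingdom Division.py | kingdomDivision
-- ===== SOURCE A (Python) =====
-- from collections import defaultdict
--
-- MOD = 10**9 + 7  # Modulus for large numbers to prevent overflow
--
-- def dfs(u, p, adj, same, diff):
--     child = []  # List to store children of the current node u
--     for v in adj[u]:  # Loop through the neighbors of u
--         if v != p:  # Ensure we don't go back to the parent node
--             dfs(v, u, adj, same, diff)  # Recursive DFS call
--             child.append(v)  # Add to child list after it's fully processed
--
--     same[u] = [1, 1]  # Initialize DP for current node for 'same' state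
--     for v in child:  # Calculate DP values using children's results
--         same[u][0] = same[u][0] * diff[v][1] % MOD  # Product of different states for children when parent is in state 0
--         same[u][1] = same[u][1] * diff[v][0] % MOD  # Product of different states for children when parent is in state 1
--
--     diff[u] = [1, 1]  # Initialize DP for 'different' state
--     for v in child:  # Calculate DP values for different states
--         diff[u][0] = diff[u][0] * (same[v][0] + diff[v][1] + diff[v][0]) % MOD  # Combining children's states when parent is in state 0
--         diff[u][1] = diff[u][1] * (same[v][1] + diff[v][1] + diff[v][0]) % MOD  # Combining children's states when parent is in state 1
--
--     diff[u][0] = (diff[u][0] - same[u][0] + MOD) % MOD  # Ensure non-negative modulo results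
--     diff[u][1] = (diff[u][1] - same[u][1] + MOD) % MOD  # Ensure non-negative modulo results
--
-- def kingdomDivision(n, roads):
--     adj = defaultdict(list)  # Dictionary to store the graph
--     for a, b in roads:  # Create graph from roads input
--         adj[a].append(b)
--         adj[b].append(a)
--
--     # Initialize DP tables
--     same = [[0, 0] for _ in range(n + 1)]
--     diff = [[0, 0] for _ in range(n + 1)]
--
--     # Perform DFS to fill DP tables
--     dfs(1, -1, adj, same, diff)  # Start DFS from node 1 with no parent
--
--     # Result as sum of both configurations of the root
--     return (diff[1][0] + diff[1][1]) % MOD  # Combine possible configurations for the root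
-- ===== SOURCE B (Python) =====
-- MOD = 10**9 + 7
--
-- def kingdomDivision(n, roads):
--     # Iterative two-phase DFS (explicit stack + reverse discovery order)
--     # instead of A's recursion; same DP recurrences, no recursion limit.
--     adj = {}
--     for a, b in roads:
--         adj.setdefault(a, []).append(b)
--         adj.setdefault(b, []).append(a)
--
--     # Phase 1: discovery (preorder) via an explicit stack.
--     order = []
--     stack = [(1, -1)]
--     while stack:
--         u, p = stack.pop()
--         order.append((u, p))
--         for v in adj.get(u, []):
--             if v != p:
--                 stack.append((v, u))
--
--     # Phase 2: process nodes children-first (reverse discovery order).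
--     same = {}
--     diff = {}
--     for u, p in reversed(order):
--         s0 = s1 = d0 = d1 = 1
--         for v in adj.get(u, []):
--             if v != p:
--                 dv0, dv1 = diff[v]
--                 sv0, sv1 = same[v]
--                 s0 = s0 * dv1 % MOD
--                 s1 = s1 * dv0 % MOD
--                 d0 = d0 * (sv0 + dv1 + dv0) % MOD
--                 d1 = d1 * (sv1 + dv1 + dv0) % MOD
--         same[u] = (s0, s1)
--         diff[u] = ((d0 - s0) % MOD, (d1 - s1) % MOD)
--
--     return (diff[1][0] + diff[1][1]) % MOD
-- ===== Notes on version B (the rewrite author's own statement) =====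
-- stated objective: alternative
-- what changed: A's recursive DFS with global DP arrays is replaced by an explicit-stack two-phase iterative DFS (discover nodes with a stack, then process them in reverse discovery order with per-node dictionaries), removing recursion entirely.
-- outside the precondition, e.g. on kingdomDivision(4, [[-2, -3], [-4, 1]]): A returns 5, B returns 2; on kingdomDivision(2, [[1, 1], [1, 2]]): A returns 49, B returns 8; on kingdomDivision(2, [[1, 2], [1, 2]]): A returns 2, B returns 2
import Mathlib
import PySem

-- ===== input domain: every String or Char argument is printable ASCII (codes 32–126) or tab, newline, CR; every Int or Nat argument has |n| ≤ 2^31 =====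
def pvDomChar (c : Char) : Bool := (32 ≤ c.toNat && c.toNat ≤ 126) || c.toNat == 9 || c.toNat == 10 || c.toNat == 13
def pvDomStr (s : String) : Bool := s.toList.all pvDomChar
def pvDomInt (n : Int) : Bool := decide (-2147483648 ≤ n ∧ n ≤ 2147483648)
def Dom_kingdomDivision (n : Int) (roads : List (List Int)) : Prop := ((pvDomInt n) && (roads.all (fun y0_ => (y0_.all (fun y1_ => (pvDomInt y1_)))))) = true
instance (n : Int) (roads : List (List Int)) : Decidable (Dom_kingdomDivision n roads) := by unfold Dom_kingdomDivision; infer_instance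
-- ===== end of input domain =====

-- B rewrites A's recursive tree DP as an explicit-stack iterative two-phase DFS
-- (discover, then process in reverse discovery order); same return value, no recursion.

-- ===== PORT A =====
-- MOD = 10**9 + 7
def kdMOD : Int := 1000000007

-- adj = defaultdict(list); for a, b in roads: adj[a].append(b); adj[b].append(a)
-- (a road that is not a 2-element list makes Python's unpacking raise; Pre_ excludes that,
--  the catch-all branch below is never reached under Pre_)
def kdAdjA (roads : List (List Int)) : PySem.Dict Int (List Int) :=
  roads.foldl (fun d r =>
    match r with
    | [a, b] => (d.modify a [] (· ++ [b])).modify b [] (· ++ [a])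
    | _ => d) PySem.Dict.empty

-- def dfs(u, p, adj, same, diff): … — recursion ported with a fuel parameter (the fuel is
-- an upper bound on the recursion depth, never exhausted under Pre_; on exhaustion the
-- state is returned unchanged).  The in-place updates of the Python lists `same`/`diff`
-- are threaded as a pair of arrays; entries are the two-element lists [x, y] as pairs.
def kdDfsA (adj : PySem.Dict Int (List Int)) :
    Nat → Int → Int → List (Int × Int) → List (Int × Int) →
    List (Int × Int) × List (Int × Int)
  | 0, _, _, same, diff => (same, diff)
  | fuel+1, u, p, same, diff =>
    -- child = []; for v in adj[u]: if v != p: dfs(v, u, adj, same, diff); child.append(v)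
    let st := (adj.getD u []).foldl
      (fun (st : List Int × List (Int × Int) × List (Int × Int)) v =>
        if v ≠ p then
          let r := kdDfsA adj fuel v u st.2.1 st.2.2
          (st.1 ++ [v], r.1, r.2)
        else st) ([], same, diff)
    let child := st.1
    let same := st.2.1
    let diff := st.2.2
    -- same[u] = [1, 1]; for v in child: same[u][0] = same[u][0]*diff[v][1] % MOD; same[u][1] = …
    let same := PySem.List.pySetD same u (1, 1)
    let same := child.foldl (fun s v =>
      let su := PySem.List.pyGetD s u (0, 0)
      let dv := PySem.List.pyGetD diff v (0, 0)
      PySem.List.pySetD s u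
        (PySem.Int.mod (su.1 * dv.2) kdMOD, PySem.Int.mod (su.2 * dv.1) kdMOD)) same
    -- diff[u] = [1, 1]; for v in child: diff[u][c] = diff[u][c]*(same[v][c]+diff[v][1]+diff[v][0]) % MOD
    let diff := PySem.List.pySetD diff u (1, 1)
    let diff := child.foldl (fun d v =>
      let du := PySem.List.pyGetD d u (0, 0)
      let sv := PySem.List.pyGetD same v (0, 0)
      let dv := PySem.List.pyGetD d v (0, 0)
      PySem.List.pySetD d u
        (PySem.Int.mod (du.1 * (sv.1 + dv.2 + dv.1)) kdMOD,
         PySem.Int.mod (du.2 * (sv.2 + dv.2 + dv.1)) kdMOD)) diff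
    -- diff[u][c] = (diff[u][c] - same[u][c] + MOD) % MOD
    let du := PySem.List.pyGetD diff u (0, 0)
    let su := PySem.List.pyGetD same u (0, 0)
    let diff := PySem.List.pySetD diff u
      (PySem.Int.mod (du.1 - su.1 + kdMOD) kdMOD, PySem.Int.mod (du.2 - su.2 + kdMOD) kdMOD)
    (same, diff)

def kingdomDivision (n : Int) (roads : List (List Int)) : Int :=
  let adj := kdAdjA roads
  -- same = [[0,0] for _ in range(n+1)]; diff likewise
  let same : List (Int × Int) := List.replicate (n + 1).toNat (0, 0)
  let diff : List (Int × Int) := List.replicate (n + 1).toNat (0, 0)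
  -- dfs(1, -1, adj, same, diff)   (fuel 2*len(roads)+4 bounds the recursion depth under Pre_)
  let r := kdDfsA adj (2 * roads.length + 4) 1 (-1) same diff
  -- return (diff[1][0] + diff[1][1]) % MOD   (index 1 in range under Pre_)
  let d1 := PySem.List.pyGetD r.2 1 (0, 0)
  PySem.Int.mod (d1.1 + d1.2) kdMOD

-- ===== PORT B =====
-- adj = {}; for a, b in roads: adj.setdefault(a, []).append(b); adj.setdefault(b, []).append(a)
def kdAdjB (roads : List (List Int)) : PySem.Dict Int (List Int) :=
  roads.foldl (fun d r =>
    match r with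
    | [a, b] =>
      let d := d.setdefault a []
      let d := d.insert a (d.getD a [] ++ [b])
      let d := d.setdefault b []
      d.insert b (d.getD b [] ++ [a])
    | _ => d) PySem.Dict.empty

-- Phase 1: while stack: u, p = stack.pop(); order.append((u,p)); for v in adj.get(u,[]): if v != p: stack.append((v,u))
-- The stack is held top-first (Python appends/pops at the tail).  Fuel counts loop
-- iterations; a generous bound, never exhausted under Pre_ (exhaustion returns `order` as is).
def kdLoopB (adj : PySem.Dict Int (List Int)) :
    Nat → List (Int × Int) → List (Int × Int) → List (Int × Int)
  | 0, _, order => order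
  | _+1, [], order => order
  | fuel+1, (u, p) :: rest, order =>
    let order := order ++ [(u, p)]
    let stack := (adj.getD u []).foldl (fun st v => if v ≠ p then (v, u) :: st else st) rest
    kdLoopB adj fuel stack order

-- Phase 2: for u, p in reversed(order): fold the DP over adj.get(u, []) skipping p,
-- then same[u], diff[u] = …  (dict lookups diff[v]/same[v] are present under Pre_;
-- the .getD (0,0) total form is never the KeyError case there)
def kdProcStep (roads : List (List Int))
    (st : PySem.Dict Int (Int × Int) × PySem.Dict Int (Int × Int)) (up : Int × Int) :
    PySem.Dict Int (Int × Int) × PySem.Dict Int (Int × Int) :=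
  let u := up.1
  let p := up.2
  -- s0 = s1 = d0 = d1 = 1, one fused loop over the neighbours
  let acc := ((kdAdjB roads).getD u []).foldl (fun (t : Int × Int × Int × Int) v =>
    if v ≠ p then
      let dv := (st.2.get? v).getD (0, 0)
      let sv := (st.1.get? v).getD (0, 0)
      (PySem.Int.mod (t.1 * dv.2) kdMOD,
       PySem.Int.mod (t.2.1 * dv.1) kdMOD,
       PySem.Int.mod (t.2.2.1 * (sv.1 + dv.2 + dv.1)) kdMOD,
       PySem.Int.mod (t.2.2.2 * (sv.2 + dv.2 + dv.1)) kdMOD)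
    else t) (1, 1, 1, 1)
  (st.1.insert u (acc.1, acc.2.1),
   st.2.insert u
     (PySem.Int.mod (acc.2.2.1 - acc.1) kdMOD, PySem.Int.mod (acc.2.2.2 - acc.2.1) kdMOD))

def kdProcB (roads : List (List Int)) (order : List (Int × Int)) :
    PySem.Dict Int (Int × Int) × PySem.Dict Int (Int × Int) :=
  order.reverse.foldl (kdProcStep roads) (PySem.Dict.empty, PySem.Dict.empty)

def kingdomDivision_alt (n : Int) (roads : List (List Int)) : Int :=
  let adj := kdAdjB roads
  let order := kdLoopB adj ((2 * roads.length + 1) ^ (2 * roads.length + 3) + 1) [(1, -1)] []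
  let r := kdProcB roads order
  let d1 := (r.2.get? 1).getD (0, 0)
  PySem.Int.mod (d1.1 + d1.2) kdMOD

-- ===== PRECONDITION & SPEC =====
-- Neighbour occurrences of u in the road list (both directions, in road order).
def pvNbrs (roads : List (List Int)) (u : Int) : List Int :=
  roads.flatMap (fun r =>
    match r with
    | [a, b] => (if a = u then [b] else []) ++ (if b = u then [a] else [])
    | _ => [])

-- Vertices within k steps of vertex 1 (breadth-first closure; duplicates harmless).
def pvReach (roads : List (List Int)) : Nat → List Int
  | 0 => [1]
  | k+1 =>
    let R := pvReach roads k
    R ++ ((R.flatMap (pvNbrs roads)).filter (fun v => decide (v ∉ R))).dedup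

def pvK (roads : List (List Int)) : Nat := 2 * roads.length + 2

-- Breadth-first distance from vertex 1 (pvK roads + 1 = unreachable sentinel).
def pvLv (roads : List (List Int)) (v : Int) : Nat :=
  (((List.range (pvK roads + 1)).find? (fun k => decide (v ∈ pvReach roads k))).getD
    (pvK roads + 1))

-- Pre_ restricts to the natural domain of the task: the part of the road graph reachable
-- from vertex 1 must be a tree on vertices 1..n (and every road a 2-element list).
-- Outside it A raises (unpacking a short road, an out-of-range index, unbounded recursion
-- on a cycle) or returns a value produced by Python's negative-index wraparound and by
-- re-running dfs over repeated/self edges — accidents of its array representation.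
def Pre_kingdomDivision (n : Int) (roads : List (List Int)) : Prop :=
  1 ≤ n ∧
  (∀ r ∈ roads, r.length = 2) ∧
  (∀ v ∈ pvReach roads (pvK roads + 1), v ∈ pvReach roads (pvK roads)) ∧
  (∀ v ∈ pvReach roads (pvK roads),
    1 ≤ v ∧ v ≤ n ∧
    (∀ w ∈ pvNbrs roads v, pvLv roads w ≠ pvLv roads v) ∧
    (v ≠ 1 → ((pvNbrs roads v).filter (fun w => decide (pvLv roads w < pvLv roads v))).length = 1))

instance (n : Int) (roads : List (List Int)) : Decidable (Pre_kingdomDivision n roads) := by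
  unfold Pre_kingdomDivision; infer_instance

def pvWitness_kingdomDivision : Int × List (List Int) := (4, [[1, 2], [3, 2], [2, 4]])

def Spec_kingdomDivision (n : Int) (roads : List (List Int)) (out : Int) : Prop := out = kingdomDivision_alt n roads
instance (n : Int) (roads : List (List Int)) (out : Int) : Decidable (Spec_kingdomDivision n roads out) := by unfold Spec_kingdomDivision; infer_instance

-- ===== CLAIM (what is proved, stated in full; the proofs are below) =====
def Claim_equal_kingdomDivision : Prop := ∀ (n : Int) (roads : List (List Int)), Dom_kingdomDivision n roads → Pre_kingdomDivision n roads → Spec_kingdomDivision n roads (kingdomDivision n roads)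

-- ===== LEMMAS AND PROOFS =====


-- Abbreviation for the proofs: an array entry read (Python list indexing, default form).
def kdGet (s : List (Int × Int)) (w : Int) : Int × Int := PySem.List.pyGetD s w (0, 0)

-- Children of u: its neighbour occurrences one level further from the root.
def kdCh (roads : List (List Int)) (u : Int) : List Int :=
  (pvNbrs roads u).filter (fun w => decide (pvLv roads u < pvLv roads w))

-- A DFS call (u, p) that actually happens: u reachable, and the occurrences below u
-- are exactly the occurrences of the parent p.
def kdGood (roads : List (List Int)) (u p : Int) : Prop :=
  u ∈ pvReach roads (pvK roads) ∧
  ∀ w ∈ pvNbrs roads u, (pvLv roads w < pvLv roads u ↔ w = p)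

-- The pure per-vertex value of the DP (fuel-indexed; fuel ≥ K+1 - level suffices).
def kdValF (roads : List (List Int)) : Nat → Int → (Int × Int) × (Int × Int)
  | 0, _ => ((1, 1), (1, 1))
  | g+1, u =>
    let ch := kdCh roads u
    let s0 := ch.foldl (fun a v => PySem.Int.mod (a * (kdValF roads g v).2.2) kdMOD) 1
    let s1 := ch.foldl (fun a v => PySem.Int.mod (a * (kdValF roads g v).2.1) kdMOD) 1
    let d0 := ch.foldl (fun a v =>
      PySem.Int.mod (a * ((kdValF roads g v).1.1 + (kdValF roads g v).2.2 + (kdValF roads g v).2.1)) kdMOD) 1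
    let d1 := ch.foldl (fun a v =>
      PySem.Int.mod (a * ((kdValF roads g v).1.2 + (kdValF roads g v).2.2 + (kdValF roads g v).2.1)) kdMOD) 1
    ((s0, s1), (PySem.Int.mod (d0 - s0 + kdMOD) kdMOD, PySem.Int.mod (d1 - s1 + kdMOD) kdMOD))

def kdVal (roads : List (List Int)) (u : Int) : (Int × Int) × (Int × Int) :=
  kdValF roads (pvK roads + 1 - pvLv roads u) u

-- The discovery order produced by B's stack loop from (u, p) (children reversed:
-- they are pushed in adjacency order and popped last-first).
def kdPreF (roads : List (List Int)) : Nat → Int → Int → List (Int × Int)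
  | 0, u, p => [(u, p)]
  | g+1, u, p => (u, p) :: (kdCh roads u).reverse.flatMap (fun v => kdPreF roads g v u)

def kdPre (roads : List (List Int)) (u p : Int) : List (Int × Int) :=
  kdPreF roads (pvK roads + 1 - pvLv roads u) u p

-- ---- basic facts about pvNbrs / pvReach / pvLv ----

theorem kd_mem_contrib (v w : Int) (r : List Int) :
    w ∈ (match r with
          | [a, b] => (if a = v then [b] else []) ++ (if b = v then [a] else [])
          | _ => ([] : List Int)) ↔ (r = [v, w] ∨ r = [w, v]) := by
  rcases r with _ | ⟨a, _ | ⟨b, _ | ⟨c, t⟩⟩⟩ <;> simp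
  by_cases ha : a = v <;> by_cases hb : b = v <;>
    simp [ha, hb] <;> constructor <;> intro h <;> simp_all

theorem kd_mem_nbrs_iff (roads : List (List Int)) (v w : Int) :
    w ∈ pvNbrs roads v ↔ ∃ r ∈ roads, r = [v, w] ∨ r = [w, v] := by
  unfold pvNbrs
  rw [List.mem_flatMap]
  constructor
  · rintro ⟨r, hr, hw⟩
    exact ⟨r, hr, (kd_mem_contrib v w r).mp hw⟩
  · rintro ⟨r, hr, h⟩
    exact ⟨r, hr, (kd_mem_contrib v w r).mpr h⟩

theorem kd_nbrs_symm (roads : List (List Int)) (v w : Int) :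
    w ∈ pvNbrs roads v ↔ v ∈ pvNbrs roads w := by
  rw [kd_mem_nbrs_iff, kd_mem_nbrs_iff]
  constructor <;> (rintro ⟨r, hr, h | h⟩ <;> exact ⟨r, hr, by simp [h]⟩)

theorem kd_nbrs_len (roads : List (List Int)) (u : Int) :
    (pvNbrs roads u).length ≤ 2 * roads.length := by
  induction roads with
  | nil => simp [pvNbrs]
  | cons r rs ih =>
    have hstep : pvNbrs (r :: rs) u =
        (match r with
          | [a, b] => (if a = u then [b] else []) ++ (if b = u then [a] else [])
          | _ => ([] : List Int)) ++ pvNbrs rs u := by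
      simp [pvNbrs, List.flatMap_cons]
    have h2 : (match r with
          | [a, b] => (if a = u then [b] else []) ++ (if b = u then [a] else [])
          | _ => ([] : List Int)).length ≤ 2 := by
      rcases r with _ | ⟨a, _ | ⟨b, _ | ⟨c, t⟩⟩⟩ <;> (simp; try (split_ifs <;> simp))
    rw [hstep, List.length_append]
    simp only [List.length_cons]
    omega

theorem kd_reach_mono (roads : List (List Int)) {j k : Nat} (h : j ≤ k) :
    pvReach roads j ⊆ pvReach roads k := by
  induction h with
  | refl => exact fun x hx => hx
  | step _ ih =>
    intro x hx
    simp only [pvReach]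
    exact List.mem_append_left _ (ih hx)

theorem kd_reach_step (roads : List (List Int)) {v w : Int} {k : Nat}
    (hv : v ∈ pvReach roads k) (hw : w ∈ pvNbrs roads v) :
    w ∈ pvReach roads (k + 1) := by
  by_cases hmem : w ∈ pvReach roads k
  · simp only [pvReach]
    exact List.mem_append_left _ hmem
  · simp only [pvReach]
    refine List.mem_append_right _ ?_
    rw [List.mem_dedup, List.mem_filter]
    exact ⟨List.mem_flatMap.mpr ⟨v, hv, hw⟩, by simpa using hmem⟩

theorem kd_lv_spec (roads : List (List Int)) {v : Int}
    (hv : v ∈ pvReach roads (pvK roads)) :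
    pvLv roads v ≤ pvK roads ∧ v ∈ pvReach roads (pvLv roads v) ∧
      ∀ j < pvLv roads v, v ∉ pvReach roads j := by
  cases hfind : (List.range (pvK roads + 1)).find? (fun k => decide (v ∈ pvReach roads k))
    with
  | none =>
    exfalso
    rw [List.find?_eq_none] at hfind
    have hK : pvK roads ∈ List.range (pvK roads + 1) := by simp
    have := hfind _ hK
    simp at this
    exact this hv
  | some m =>
    have hlv : pvLv roads v = m := by simp [pvLv, hfind]
    rw [List.find?_eq_some_iff_getElem] at hfind
    obtain ⟨hm, i, hi, hgi, hleast⟩ := hfind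
    have him : i = m := by simpa using hgi
    subst him
    have hiK : i < pvK roads + 1 := by simpa using hi
    refine ⟨by omega, by rw [hlv]; simpa using hm, ?_⟩
    intro j hj hmem
    rw [hlv] at hj
    have := hleast j (by simpa using hj)
    simp at this
    exact this hmem

theorem kd_lv_le (roads : List (List Int)) {v : Int} {k : Nat}
    (h : v ∈ pvReach roads k) (hk : k ≤ pvK roads) : pvLv roads v ≤ k := by
  have hv : v ∈ pvReach roads (pvK roads) := kd_reach_mono roads hk h
  obtain ⟨_, _, hleast⟩ := kd_lv_spec roads hv
  by_contra hlt
  exact hleast k (by omega) h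

theorem kd_mem_reach_lv (roads : List (List Int)) {v : Int}
    (h : v ∈ pvReach roads (pvK roads)) : v ∈ pvReach roads (pvLv roads v) :=
  (kd_lv_spec roads h).2.1

theorem kd_lv_le_K (roads : List (List Int)) {v : Int}
    (h : v ∈ pvReach roads (pvK roads)) : pvLv roads v ≤ pvK roads :=
  (kd_lv_spec roads h).1

theorem kd_lv_one (roads : List (List Int)) : pvLv roads 1 = 0 := by
  have h1 : (1 : Int) ∈ pvReach roads 0 := by simp [pvReach]
  have := kd_lv_le roads h1 (Nat.zero_le _)
  omega

-- ---- facts that use the precondition ----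

theorem kd_nbr_reach {n : Int} {roads : List (List Int)} (h : Pre_kingdomDivision n roads)
    {v w : Int} (hv : v ∈ pvReach roads (pvK roads)) (hw : w ∈ pvNbrs roads v) :
    w ∈ pvReach roads (pvK roads) ∧ pvLv roads w ≤ pvLv roads v + 1 := by
  obtain ⟨hn, hshape, hclosed, hcert⟩ := h
  have hlvK := kd_lv_le_K roads hv
  have hw1 : w ∈ pvReach roads (pvLv roads v + 1) :=
    kd_reach_step roads (kd_mem_reach_lv roads hv) hw
  by_cases hcase : pvLv roads v < pvK roads
  · have hwK : w ∈ pvReach roads (pvK roads) :=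
      kd_reach_mono roads (by omega) hw1
    exact ⟨hwK, kd_lv_le roads hw1 (by omega)⟩
  · have hveq : pvLv roads v = pvK roads := by omega
    have hwK1 : w ∈ pvReach roads (pvK roads + 1) := by
      rw [hveq] at hw1; exact hw1
    have hwK := hclosed w hwK1
    exact ⟨hwK, by have := kd_lv_le_K roads hwK; omega⟩

theorem kd_good_root {n : Int} {roads : List (List Int)} (h : Pre_kingdomDivision n roads) :
    kdGood roads 1 (-1) := by
  have h1 : (1 : Int) ∈ pvReach roads (pvK roads) :=
    kd_reach_mono roads (Nat.zero_le _) (by simp [pvReach])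
  refine ⟨h1, ?_⟩
  intro w hw
  have hwR := (kd_nbr_reach h h1 hw).1
  have hw1 : 1 ≤ w := (h.2.2.2 w hwR).1
  constructor
  · intro hlt
    rw [kd_lv_one] at hlt
    omega
  · intro hweq
    omega

-- children of a good call: the `v != p` filter is exactly the one-level-deeper filter
theorem kd_children_eq {n : Int} {roads : List (List Int)} (h : Pre_kingdomDivision n roads)
    {u p : Int} (hg : kdGood roads u p) :
    (pvNbrs roads u).filter (fun w => decide (w ≠ p)) = kdCh roads u := by
  unfold kdCh
  apply List.filter_congr
  intro w hw
  have hiff := hg.2 w hw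
  have hne : pvLv roads w ≠ pvLv roads u :=
    (h.2.2.2 u hg.1).2.2.1 w hw
  simp only [decide_eq_decide]
  constructor
  · intro hwp
    have : ¬ pvLv roads w < pvLv roads u := fun hc => hwp (hiff.mp hc)
    omega
  · intro hlt hweq
    have := hiff.mpr hweq
    omega

theorem kd_ch_lv {n : Int} {roads : List (List Int)} (h : Pre_kingdomDivision n roads)
    {u p v : Int} (hg : kdGood roads u p) (hv : v ∈ kdCh roads u) :
    v ∈ pvReach roads (pvK roads) ∧ pvLv roads v = pvLv roads u + 1 := by
  rw [kdCh, List.mem_filter] at hv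
  obtain ⟨hmem, hlt⟩ := hv
  have hlt' : pvLv roads u < pvLv roads v := by simpa using hlt
  obtain ⟨hvR, hle⟩ := kd_nbr_reach h hg.1 hmem
  exact ⟨hvR, by omega⟩

theorem kd_ch_good {n : Int} {roads : List (List Int)} (h : Pre_kingdomDivision n roads)
    {u p v : Int} (hg : kdGood roads u p) (hv : v ∈ kdCh roads u) :
    kdGood roads v u := by
  obtain ⟨hvR, hlv⟩ := kd_ch_lv h hg hv
  rw [kdCh, List.mem_filter] at hv
  obtain ⟨hmem, _⟩ := hv
  have hv1 : v ≠ 1 := by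
    intro hv1
    rw [hv1, kd_lv_one] at hlv
    omega
  have huniq := (h.2.2.2 v hvR).2.2.2 hv1
  have humem : u ∈ pvNbrs roads v := (kd_nbrs_symm roads u v).mp hmem
  have hulow : pvLv roads u < pvLv roads v := by omega
  refine ⟨hvR, ?_⟩
  intro w hw
  constructor
  · intro hlt
    -- both w and u lie in the (unique-element) lower filter of v
    have hwf : w ∈ (pvNbrs roads v).filter
        (fun w => decide (pvLv roads w < pvLv roads v)) := by
      rw [List.mem_filter]; exact ⟨hw, by simpa using hlt⟩
    have huf : u ∈ (pvNbrs roads v).filter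
        (fun w => decide (pvLv roads w < pvLv roads v)) := by
      rw [List.mem_filter]; exact ⟨humem, by simpa using hulow⟩
    obtain ⟨a, ha⟩ := List.length_eq_one_iff.mp huniq
    rw [ha] at hwf huf
    simp at hwf huf
    rw [hwf, huf]
  · intro hweq
    rw [hweq]
    exact hulow

theorem kd_good_bounds {n : Int} {roads : List (List Int)} (h : Pre_kingdomDivision n roads)
    {u p : Int} (hg : kdGood roads u p) : 1 ≤ u ∧ u ≤ n := by
  exact ⟨(h.2.2.2 u hg.1).1, (h.2.2.2 u hg.1).2.1⟩

-- canonical-fuel unfoldings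
theorem kd_val_unfold {n : Int} {roads : List (List Int)} (h : Pre_kingdomDivision n roads)
    {u p : Int} (hg : kdGood roads u p) :
    kdVal roads u = kdValF roads (pvK roads + 1 - pvLv roads u) u ∧
    ∀ v ∈ kdCh roads u, kdValF roads (pvK roads - pvLv roads u) v = kdVal roads v := by
  refine ⟨rfl, ?_⟩
  intro v hv
  obtain ⟨hvR, hlv⟩ := kd_ch_lv h hg hv
  rw [kdVal, hlv]
  congr 1
  omega

theorem kd_pre_unfold {n : Int} {roads : List (List Int)} (h : Pre_kingdomDivision n roads)
    {u p : Int} (hg : kdGood roads u p) :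
    kdPre roads u p = (u, p) :: (kdCh roads u).reverse.flatMap (fun v => kdPre roads v u) := by
  have hlvK := kd_lv_le_K roads hg.1
  have hstep : pvK roads + 1 - pvLv roads u = (pvK roads - pvLv roads u) + 1 := by omega
  rw [kdPre, hstep]
  simp only [kdPreF]
  congr 1
  apply List.flatMap_congr
  intro v hv
  rw [List.mem_reverse] at hv
  obtain ⟨hvR, hlv⟩ := kd_ch_lv h hg hv
  rw [kdPre, hlv]
  congr 1
  omega


-- ---- the adjacency dictionaries both read back as pvNbrs ----

theorem kd_getD_setdefault (d : PySem.Dict Int (List Int)) (k k' : Int) :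
    (d.setdefault k []).getD k' [] = d.getD k' [] := by
  by_cases hc : d.contains k
  · rw [PySem.Dict.setdefault_of_contains d [] hc]
  · rw [PySem.Dict.setdefault_of_not_contains d [] (by simpa using hc)]
    by_cases hk : k' = k
    · subst hk
      rw [PySem.Dict.getD_insert_self]
      show ([] : List Int) = (d.get? k').getD []
      rw [(PySem.Dict.get?_eq_none_iff_contains d k').mpr (by simpa using hc)]
      rfl
    · rw [PySem.Dict.getD_insert_of_ne _ _ _ hk]

theorem kd_adjA_aux (u : Int) :
    ∀ (rds : List (List Int)) (d : PySem.Dict Int (List Int)),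
      ((rds.foldl (fun d r =>
        match r with
        | [a, b] => (d.modify a [] (· ++ [b])).modify b [] (· ++ [a])
        | _ => d) d).getD u []) = d.getD u [] ++ pvNbrs rds u := by
  intro rds
  induction rds with
  | nil => intro d; simp [pvNbrs]
  | cons r rs ih =>
    intro d
    rcases r with _ | ⟨a, _ | ⟨b, _ | ⟨c, t⟩⟩⟩ <;>
      rw [List.foldl_cons, ih]
    · simp [pvNbrs, List.flatMap_cons]
    · simp [pvNbrs, List.flatMap_cons]
    · have hhead : ((d.modify a [] (· ++ [b])).modify b [] (· ++ [a])).getD u [] =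
          d.getD u [] ++ ((if a = u then [b] else []) ++ (if b = u then [a] else [])) := by
        by_cases hb : u = b
        · subst hb
          rw [PySem.Dict.getD_modify_self]
          by_cases ha : u = a
          · subst ha
            rw [PySem.Dict.getD_modify_self]
            simp [List.append_assoc]
          · have ha' : ¬ a = u := fun h => ha h.symm
            rw [PySem.Dict.getD_modify_of_ne _ _ _ ha]
            simp [ha']
        · have hb' : ¬ b = u := fun h => hb h.symm
          rw [PySem.Dict.getD_modify_of_ne _ _ _ hb]
          by_cases ha : u = a
          · subst ha
            rw [PySem.Dict.getD_modify_self]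
            simp [hb']
          · have ha' : ¬ a = u := fun h => ha h.symm
            rw [PySem.Dict.getD_modify_of_ne _ _ _ ha]
            simp [ha', hb']
      rw [hhead]
      have htail : pvNbrs ([a, b] :: rs) u =
          ((if a = u then [b] else []) ++ (if b = u then [a] else [])) ++ pvNbrs rs u := by
        simp [pvNbrs, List.flatMap_cons]
      rw [htail, List.append_assoc]
    · simp [pvNbrs, List.flatMap_cons]

theorem kd_adjA_getD (roads : List (List Int)) (u : Int) :
    (kdAdjA roads).getD u [] = pvNbrs roads u := by
  rw [kdAdjA, kd_adjA_aux u roads PySem.Dict.empty, PySem.Dict.getD_empty]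
  simp

theorem kd_adjB_aux (u : Int) :
    ∀ (rds : List (List Int)) (d : PySem.Dict Int (List Int)),
      ((rds.foldl (fun d r =>
        match r with
        | [a, b] =>
          let d := d.setdefault a []
          let d := d.insert a (d.getD a [] ++ [b])
          let d := d.setdefault b []
          d.insert b (d.getD b [] ++ [a])
        | _ => d) d).getD u []) = d.getD u [] ++ pvNbrs rds u := by
  have hstep : ∀ (d : PySem.Dict Int (List Int)) (a b : Int),
      (((d.setdefault a []).insert a ((d.setdefault a []).getD a [] ++ [b]))).getD u [] =
        if a = u then d.getD u [] ++ [b] else d.getD u [] := by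
    intro d a b
    by_cases ha : a = u
    · subst ha
      rw [PySem.Dict.getD_insert_self, kd_getD_setdefault]
      simp
    · rw [PySem.Dict.getD_insert_of_ne _ _ _ (fun h => ha h.symm), kd_getD_setdefault]
      simp [ha]
  intro rds
  induction rds with
  | nil => intro d; simp [pvNbrs]
  | cons r rs ih =>
    intro d
    rcases r with _ | ⟨a, _ | ⟨b, _ | ⟨c, t⟩⟩⟩ <;>
      rw [List.foldl_cons, ih]
    · simp [pvNbrs, List.flatMap_cons]
    · simp [pvNbrs, List.flatMap_cons]
    · have hhead :
          (let d1 := d.setdefault a []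
           let d2 := d1.insert a (d1.getD a [] ++ [b])
           let d3 := d2.setdefault b []
           d3.insert b (d3.getD b [] ++ [a])).getD u [] =
          d.getD u [] ++ ((if a = u then [b] else []) ++ (if b = u then [a] else [])) := by
        show (((((d.setdefault a []).insert a ((d.setdefault a []).getD a [] ++ [b])).setdefault b
            []).insert b
              ((((d.setdefault a []).insert a ((d.setdefault a []).getD a [] ++ [b])).setdefault b
                []).getD b [] ++ [a]))).getD u [] = _
        rw [hstep ((d.setdefault a []).insert a ((d.setdefault a []).getD a [] ++ [b])) b a,
          hstep d a b]
        by_cases ha : a = u <;> by_cases hb : b = u <;>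
          simp [ha, hb, List.append_assoc]
      rw [hhead]
      have htail : pvNbrs ([a, b] :: rs) u =
          ((if a = u then [b] else []) ++ (if b = u then [a] else [])) ++ pvNbrs rs u := by
        simp [pvNbrs, List.flatMap_cons]
      rw [htail, List.append_assoc]
    · simp [pvNbrs, List.flatMap_cons]

theorem kd_adjB_getD (roads : List (List Int)) (u : Int) :
    (kdAdjB roads).getD u [] = pvNbrs roads u := by
  rw [kdAdjB, kd_adjB_aux u roads PySem.Dict.empty, PySem.Dict.getD_empty]
  simp

-- ---- A's recursive dfs computes kdVal ----

theorem kdGet_def (s : List (Int × Int)) (w : Int) :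
    PySem.List.pyGetD s w ((0 : Int), (0 : Int)) = kdGet s w := rfl

theorem kd_len_int {n : Int} (hn : 1 ≤ n) (s : List (Int × Int))
    (hs : s.length = (n + 1).toNat) : (s.length : Int) = n + 1 := by
  rw [hs]
  omega

theorem kd_get_set {n : Int} (hn : 1 ≤ n) (s : List (Int × Int)) (hs : s.length = (n + 1).toNat)
    {u w : Int} (hu : 0 ≤ u) (hun : u ≤ n) (hw : 0 ≤ w) (hwn : w ≤ n) (x : Int × Int) :
    kdGet (PySem.List.pySetD s u x) w = if w = u then x else kdGet s w := by
  have hsl := kd_len_int hn s hs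
  unfold kdGet
  rw [PySem.List.pySetD_of_nonneg _ _ hu]
  rw [PySem.List.pyGetD_eq_getElem _ _ hw (by rw [List.length_set]; omega)]
  rw [List.getElem_set]
  by_cases hwu : w = u
  · subst hwu
    simp
  · have hne : u.toNat ≠ w.toNat := by omega
    rw [if_neg hne, if_neg hwu]
    rw [PySem.List.pyGetD_eq_getElem _ _ hw (by omega)]

theorem kd_set_set (s : List (Int × Int)) {u : Int} (hu : 0 ≤ u) (x y : Int × Int) :
    PySem.List.pySetD (PySem.List.pySetD s u x) u y = PySem.List.pySetD s u y := by
  rw [PySem.List.pySetD_of_nonneg _ _ hu, PySem.List.pySetD_of_nonneg _ _ hu,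
    PySem.List.pySetD_of_nonneg _ _ hu, List.set_set]

theorem kd_val_eq {n : Int} {roads : List (List Int)} (h : Pre_kingdomDivision n roads)
    {u p : Int} (hg : kdGood roads u p) : kdVal roads u =
      (((kdCh roads u).foldl (fun a v => PySem.Int.mod (a * (kdVal roads v).2.2) kdMOD) 1,
        (kdCh roads u).foldl (fun a v => PySem.Int.mod (a * (kdVal roads v).2.1) kdMOD) 1),
       (PySem.Int.mod
         ((kdCh roads u).foldl (fun a v =>
           PySem.Int.mod (a * ((kdVal roads v).1.1 + (kdVal roads v).2.2 + (kdVal roads v).2.1)) kdMOD) 1 -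
          (kdCh roads u).foldl (fun a v => PySem.Int.mod (a * (kdVal roads v).2.2) kdMOD) 1 + kdMOD) kdMOD,
        PySem.Int.mod
         ((kdCh roads u).foldl (fun a v =>
           PySem.Int.mod (a * ((kdVal roads v).1.2 + (kdVal roads v).2.2 + (kdVal roads v).2.1)) kdMOD) 1 -
          (kdCh roads u).foldl (fun a v => PySem.Int.mod (a * (kdVal roads v).2.1) kdMOD) 1 + kdMOD) kdMOD)) := by
    have hlvK := kd_lv_le_K roads hg.1
    have hm : pvK roads + 1 - pvLv roads u = (pvK roads - pvLv roads u) + 1 := by omega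
    set m := pvK roads - pvLv roads u with hmdef
    have hval : kdVal roads u = kdValF roads (m + 1) u := by rw [kdVal, hm]
    have hchval : ∀ v ∈ kdCh roads u,
        kdValF roads m v = kdVal roads v := (kd_val_unfold h hg).2
    rw [hval]
    simp only [kdValF]
    rw [PySem.List.foldl_congr_mem _
        (fun (a : Int) v => PySem.Int.mod (a * (kdValF roads m v).2.2) kdMOD)
        (fun (a : Int) v => PySem.Int.mod (a * (kdVal roads v).2.2) kdMOD) _
        (by intro acc v hv; simp only [hchval v hv]),
      PySem.List.foldl_congr_mem _
        (fun (a : Int) v => PySem.Int.mod (a * (kdValF roads m v).2.1) kdMOD)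
        (fun (a : Int) v => PySem.Int.mod (a * (kdVal roads v).2.1) kdMOD) _
        (by intro acc v hv; simp only [hchval v hv]),
      PySem.List.foldl_congr_mem _
        (fun (a : Int) v =>
          PySem.Int.mod (a * ((kdValF roads m v).1.1 + (kdValF roads m v).2.2 + (kdValF roads m v).2.1)) kdMOD)
        (fun (a : Int) v =>
          PySem.Int.mod (a * ((kdVal roads v).1.1 + (kdVal roads v).2.2 + (kdVal roads v).2.1)) kdMOD) _
        (by intro acc v hv; simp only [hchval v hv]),
      PySem.List.foldl_congr_mem _
        (fun (a : Int) v =>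
          PySem.Int.mod (a * ((kdValF roads m v).1.2 + (kdValF roads m v).2.2 + (kdValF roads m v).2.1)) kdMOD)
        (fun (a : Int) v =>
          PySem.Int.mod (a * ((kdVal roads v).1.2 + (kdVal roads v).2.2 + (kdVal roads v).2.1)) kdMOD) _
        (by intro acc v hv; simp only [hchval v hv])]

theorem kd_sfold {n : Int} (hn : 1 ≤ n) (s1 d1 : List (Int × Int))
    (hs : s1.length = (n + 1).toNat) {u : Int} (hu0 : 0 ≤ u) (hun : u ≤ n) :
    ∀ (cl : List Int) (acc : Int × Int),
      cl.foldl (fun s v =>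
        PySem.List.pySetD s u
          (PySem.Int.mod ((kdGet s u).1 * (kdGet d1 v).2) kdMOD,
           PySem.Int.mod ((kdGet s u).2 * (kdGet d1 v).1) kdMOD)) (PySem.List.pySetD s1 u acc) =
      PySem.List.pySetD s1 u
        (cl.foldl (fun t v =>
          (PySem.Int.mod (t.1 * (kdGet d1 v).2) kdMOD,
           PySem.Int.mod (t.2 * (kdGet d1 v).1) kdMOD)) acc) := by
  intro cl
  induction cl with
  | nil => intro acc; simp
  | cons c cl' ih =>
    intro acc
    rw [List.foldl_cons, List.foldl_cons]
    have hget : kdGet (PySem.List.pySetD s1 u acc) u = acc := by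
      rw [kd_get_set hn s1 hs hu0 hun hu0 hun, if_pos rfl]
    rw [hget, kd_set_set s1 hu0]
    exact ih _

theorem kd_dfold {n : Int} (hn : 1 ≤ n) (d1 s3 : List (Int × Int))
    (hd : d1.length = (n + 1).toNat) {u : Int} (hu0 : 0 ≤ u) (hun : u ≤ n) :
    ∀ (cl : List Int), (∀ v ∈ cl, 0 ≤ v ∧ v ≤ n ∧ v ≠ u) → ∀ (acc : Int × Int),
      cl.foldl (fun dd v =>
        PySem.List.pySetD dd u
          (PySem.Int.mod ((kdGet dd u).1 * ((kdGet s3 v).1 + (kdGet dd v).2 + (kdGet dd v).1)) kdMOD,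
           PySem.Int.mod ((kdGet dd u).2 * ((kdGet s3 v).2 + (kdGet dd v).2 + (kdGet dd v).1)) kdMOD))
        (PySem.List.pySetD d1 u acc) =
      PySem.List.pySetD d1 u
        (cl.foldl (fun t v =>
          (PySem.Int.mod (t.1 * ((kdGet s3 v).1 + (kdGet d1 v).2 + (kdGet d1 v).1)) kdMOD,
           PySem.Int.mod (t.2 * ((kdGet s3 v).2 + (kdGet d1 v).2 + (kdGet d1 v).1)) kdMOD)) acc) := by
  intro cl
  induction cl with
  | nil => intro _ acc; simp
  | cons c cl' ih =>
    intro hmem acc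
    obtain ⟨hc0, hcn, hcu⟩ := hmem c List.mem_cons_self
    rw [List.foldl_cons, List.foldl_cons]
    have hgetu : kdGet (PySem.List.pySetD d1 u acc) u = acc := by
      rw [kd_get_set hn d1 hd hu0 hun hu0 hun, if_pos rfl]
    have hgetc : kdGet (PySem.List.pySetD d1 u acc) c = kdGet d1 c := by
      rw [kd_get_set hn d1 hd hu0 hun hc0 hcn, if_neg hcu]
    rw [hgetu, hgetc, kd_set_set d1 hu0]
    exact ih (fun v hv => hmem v (List.mem_cons_of_mem _ hv)) _

theorem kd_dfsA_spec {n : Int} {roads : List (List Int)} (h : Pre_kingdomDivision n roads) :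
    ∀ (g : Nat) (u p : Int) (same diff : List (Int × Int)),
      kdGood roads u p → pvK roads + 1 ≤ pvLv roads u + g →
      same.length = (n + 1).toNat → diff.length = (n + 1).toNat →
      (kdDfsA (kdAdjA roads) g u p same diff).1.length = (n + 1).toNat ∧
      (kdDfsA (kdAdjA roads) g u p same diff).2.length = (n + 1).toNat ∧
      (∀ w : Int, 0 ≤ w → w ≤ n →
        (kdGet (kdDfsA (kdAdjA roads) g u p same diff).1 w = kdGet same w ∧
         kdGet (kdDfsA (kdAdjA roads) g u p same diff).2 w = kdGet diff w) ∨
        (kdGet (kdDfsA (kdAdjA roads) g u p same diff).1 w = (kdVal roads w).1 ∧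
         kdGet (kdDfsA (kdAdjA roads) g u p same diff).2 w = (kdVal roads w).2)) ∧
      kdGet (kdDfsA (kdAdjA roads) g u p same diff).1 u = (kdVal roads u).1 ∧
      kdGet (kdDfsA (kdAdjA roads) g u p same diff).2 u = (kdVal roads u).2 := by
  have hn : 1 ≤ n := h.1
  intro g
  induction g with
  | zero =>
    intro u p same diff hg hfuel _ _
    exfalso
    have := kd_lv_le_K roads hg.1
    omega
  | succ g ih =>
    intro u p same diff hg hfuel hls hld
    have hlvK := kd_lv_le_K roads hg.1
    obtain ⟨hu1, hun⟩ := kd_good_bounds h hg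
    have hu0 : (0 : Int) ≤ u := by omega
    have hchne : ∀ v ∈ kdCh roads u, 1 ≤ v ∧ v ≤ n ∧ v ≠ u := by
      intro v hv
      obtain ⟨hvR, hlv⟩ := kd_ch_lv h hg hv
      obtain ⟨hv1, hvn⟩ := kd_good_bounds h (kd_ch_good h hg hv)
      refine ⟨hv1, hvn, ?_⟩
      intro hvu
      rw [hvu] at hlv
      omega
    -- the children loop establishes the child list and the two arrays
    have hloop : ∀ (l : List Int), (∀ x ∈ l, x ∈ pvNbrs roads u) →
        ∀ (cl : List Int) (s d : List (Int × Int)),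
        s.length = (n + 1).toNat → d.length = (n + 1).toNat →
        (∀ w : Int, 0 ≤ w → w ≤ n →
          (kdGet s w = kdGet same w ∧ kdGet d w = kdGet diff w) ∨
          (kdGet s w = (kdVal roads w).1 ∧ kdGet d w = (kdVal roads w).2)) →
        (∀ v ∈ cl, 1 ≤ v ∧ v ≤ n ∧
          kdGet s v = (kdVal roads v).1 ∧ kdGet d v = (kdVal roads v).2) →
        ∃ s' d',
          l.foldl (fun (st : List Int × List (Int × Int) × List (Int × Int)) v =>
            if v ≠ p then
              let r := kdDfsA (kdAdjA roads) g v u st.2.1 st.2.2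
              (st.1 ++ [v], r.1, r.2)
            else st) (cl, s, d) = (cl ++ l.filter (fun v => decide (v ≠ p)), s', d') ∧
          s'.length = (n + 1).toNat ∧ d'.length = (n + 1).toNat ∧
          (∀ w : Int, 0 ≤ w → w ≤ n →
            (kdGet s' w = kdGet same w ∧ kdGet d' w = kdGet diff w) ∨
            (kdGet s' w = (kdVal roads w).1 ∧ kdGet d' w = (kdVal roads w).2)) ∧
          (∀ v ∈ cl ++ l.filter (fun v => decide (v ≠ p)), 1 ≤ v ∧ v ≤ n ∧
            kdGet s' v = (kdVal roads v).1 ∧ kdGet d' v = (kdVal roads v).2) := by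
      intro l
      induction l with
      | nil =>
        intro _ cl s d hls' hld' hQ hcl
        exact ⟨s, d, by simp, hls', hld', hQ, by simpa using hcl⟩
      | cons v l' ihl =>
        intro hmem cl s d hls' hld' hQ hcl
        by_cases hvp : v ≠ p
        · have hvnb : v ∈ pvNbrs roads u := hmem v List.mem_cons_self
          have hvch : v ∈ kdCh roads u := by
            rw [← kd_children_eq h hg, List.mem_filter]
            exact ⟨hvnb, by simpa using hvp⟩
          have hvg : kdGood roads v u := kd_ch_good h hg hvch
          have hvlv := (kd_ch_lv h hg hvch).2
          have hfv : pvK roads + 1 ≤ pvLv roads v + g := by omega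
          obtain ⟨hrl1, hrl2, hQ2, hru1, hru2⟩ := ih v u s d hvg hfv hls' hld'
          obtain ⟨hv1, hv2, _⟩ := hchne v hvch
          have hQ3 : ∀ w : Int, 0 ≤ w → w ≤ n →
              (kdGet (kdDfsA (kdAdjA roads) g v u s d).1 w = kdGet same w ∧
               kdGet (kdDfsA (kdAdjA roads) g v u s d).2 w = kdGet diff w) ∨
              (kdGet (kdDfsA (kdAdjA roads) g v u s d).1 w = (kdVal roads w).1 ∧
               kdGet (kdDfsA (kdAdjA roads) g v u s d).2 w = (kdVal roads w).2) := by
            intro w h0 h1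
            rcases hQ2 w h0 h1 with ⟨e1, e2⟩ | hval'
            · rcases hQ w h0 h1 with ⟨f1, f2⟩ | hval'
              · exact Or.inl ⟨by rw [e1, f1], by rw [e2, f2]⟩
              · exact Or.inr ⟨by rw [e1, hval'.1], by rw [e2, hval'.2]⟩
            · exact Or.inr hval'
          have hcl3 : ∀ x ∈ cl ++ [v], 1 ≤ x ∧ x ≤ n ∧
              kdGet (kdDfsA (kdAdjA roads) g v u s d).1 x = (kdVal roads x).1 ∧
              kdGet (kdDfsA (kdAdjA roads) g v u s d).2 x = (kdVal roads x).2 := by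
            intro x hx
            rcases List.mem_append.mp hx with hx | hx
            · obtain ⟨hb1, hb2, he1, he2⟩ := hcl x hx
              refine ⟨hb1, hb2, ?_⟩
              rcases hQ2 x (by omega) hb2 with ⟨e1, e2⟩ | hval'
              · exact ⟨by rw [e1, he1], by rw [e2, he2]⟩
              · exact hval'
            · have hxv : x = v := by simpa using hx
              rw [hxv]
              exact ⟨hv1, hv2, hru1, hru2⟩
          obtain ⟨s', d', heq', hl1', hl2', hQ', hcl'⟩ :=
            ihl (fun x hx => hmem x (List.mem_cons_of_mem _ hx)) (cl ++ [v])
              (kdDfsA (kdAdjA roads) g v u s d).1 (kdDfsA (kdAdjA roads) g v u s d).2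
              hrl1 hrl2 hQ3 hcl3
          refine ⟨s', d', ?_, hl1', hl2', hQ', ?_⟩
          · rw [List.foldl_cons, if_pos hvp, heq']
            have : (v :: l').filter (fun v => decide (v ≠ p)) =
                v :: l'.filter (fun v => decide (v ≠ p)) := by
              simp [hvp]
            rw [this]
            simp [List.append_assoc]
          · intro x hx
            apply hcl'
            have : (v :: l').filter (fun v => decide (v ≠ p)) =
                v :: l'.filter (fun v => decide (v ≠ p)) := by
              simp [hvp]
            rw [this] at hx
            simpa [List.append_assoc] using hx
        · rw [List.foldl_cons, if_neg hvp]
          have hfilter : (v :: l').filter (fun v => decide (v ≠ p)) =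
              l'.filter (fun v => decide (v ≠ p)) := by
            simp [hvp]
          rw [hfilter]
          exact ihl (fun x hx => hmem x (List.mem_cons_of_mem _ hx)) cl s d hls' hld' hQ hcl
    obtain ⟨s1, d1, heq, hl1, hl2, hQ1, hcl1⟩ :=
      hloop (pvNbrs roads u) (fun x hx => hx) [] same diff hls hld
        (fun w _ _ => Or.inl ⟨rfl, rfl⟩) (by simp)
    rw [List.nil_append, kd_children_eq h hg] at heq hcl1
    have hS : (kdCh roads u).foldl (fun t v =>
        (PySem.Int.mod (t.1 * (kdGet d1 v).2) kdMOD,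
         PySem.Int.mod (t.2 * (kdGet d1 v).1) kdMOD)) ((1 : Int), (1 : Int)) =
        (kdVal roads u).1 := by
      rw [PySem.List.foldl_congr_mem _ _ (fun (t : Int × Int) v =>
          (PySem.Int.mod (t.1 * (kdVal roads v).2.2) kdMOD,
           PySem.Int.mod (t.2 * (kdVal roads v).2.1) kdMOD)) _
          (by intro acc v hv; simp only [(hcl1 v hv).2.2.2]),
        PySem.List.foldl_prod_mk
          (f := fun a v => PySem.Int.mod (a * (kdVal roads v).2.2) kdMOD)
          (g := fun a v => PySem.Int.mod (a * (kdVal roads v).2.1) kdMOD),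
        kd_val_eq h hg]
    have hs3get : ∀ v ∈ kdCh roads u,
        kdGet (PySem.List.pySetD s1 u (kdVal roads u).1) v = (kdVal roads v).1 := by
      intro v hv
      obtain ⟨hv1, hvn, hvu⟩ := hchne v hv
      rw [kd_get_set hn s1 hl1 hu0 hun (by omega) hvn, if_neg hvu]
      exact (hcl1 v hv).2.2.1
    have hD : (kdCh roads u).foldl (fun t v =>
        (PySem.Int.mod (t.1 * ((kdGet (PySem.List.pySetD s1 u (kdVal roads u).1) v).1 +
          (kdGet d1 v).2 + (kdGet d1 v).1)) kdMOD,
         PySem.Int.mod (t.2 * ((kdGet (PySem.List.pySetD s1 u (kdVal roads u).1) v).2 +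
          (kdGet d1 v).2 + (kdGet d1 v).1)) kdMOD)) ((1 : Int), (1 : Int)) =
        ((kdCh roads u).foldl (fun a v =>
           PySem.Int.mod (a * ((kdVal roads v).1.1 + (kdVal roads v).2.2 + (kdVal roads v).2.1)) kdMOD) 1,
         (kdCh roads u).foldl (fun a v =>
           PySem.Int.mod (a * ((kdVal roads v).1.2 + (kdVal roads v).2.2 + (kdVal roads v).2.1)) kdMOD) 1) := by
      rw [PySem.List.foldl_congr_mem _ _ (fun (t : Int × Int) v =>
          (PySem.Int.mod (t.1 * ((kdVal roads v).1.1 + (kdVal roads v).2.2 + (kdVal roads v).2.1)) kdMOD,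
           PySem.Int.mod (t.2 * ((kdVal roads v).1.2 + (kdVal roads v).2.2 + (kdVal roads v).2.1)) kdMOD)) _
          (by
            intro acc v hv
            simp only [hs3get v hv, (hcl1 v hv).2.2.2]),
        PySem.List.foldl_prod_mk
          (f := fun a v =>
            PySem.Int.mod (a * ((kdVal roads v).1.1 + (kdVal roads v).2.2 + (kdVal roads v).2.1)) kdMOD)
          (g := fun (a : Int) v =>
            PySem.Int.mod (a * ((kdVal roads v).1.2 + (kdVal roads v).2.2 + (kdVal roads v).2.1)) kdMOD)]
    have hmain : kdDfsA (kdAdjA roads) (g + 1) u p same diff =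
        (PySem.List.pySetD s1 u (kdVal roads u).1,
         PySem.List.pySetD d1 u (kdVal roads u).2) := by
      simp only [kdDfsA, kdGet_def]
      rw [kd_adjA_getD, heq]
      simp only []
      rw [kd_sfold hn s1 d1 hl1 hu0 hun (kdCh roads u) (1, 1), hS,
        kd_dfold hn d1 (PySem.List.pySetD s1 u (kdVal roads u).1) hl2 hu0 hun (kdCh roads u)
          (fun v hv => by
            obtain ⟨hv1, hvn, hvu⟩ := hchne v hv
            exact ⟨by omega, hvn, hvu⟩) (1, 1), hD]
      rw [kd_get_set hn d1 hl2 hu0 hun hu0 hun, if_pos rfl]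
      rw [kd_get_set hn s1 hl1 hu0 hun hu0 hun, if_pos rfl]
      rw [kd_set_set d1 hu0]
      rw [kd_val_eq h hg]
    rw [hmain]
    have hgu1 : kdGet (PySem.List.pySetD s1 u (kdVal roads u).1) u = (kdVal roads u).1 := by
      rw [kd_get_set hn s1 hl1 hu0 hun hu0 hun, if_pos rfl]
    have hgu2 : kdGet (PySem.List.pySetD d1 u (kdVal roads u).2) u = (kdVal roads u).2 := by
      rw [kd_get_set hn d1 hl2 hu0 hun hu0 hun, if_pos rfl]
    refine ⟨by simpa [PySem.List.length_pySetD] using hl1,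
      by simpa [PySem.List.length_pySetD] using hl2, ?_, hgu1, hgu2⟩
    intro w h0 h1
    by_cases hwu : w = u
    · subst hwu
      exact Or.inr ⟨hgu1, hgu2⟩
    · rw [kd_get_set hn s1 hl1 hu0 hun h0 h1, if_neg hwu,
        kd_get_set hn d1 hl2 hu0 hun h0 h1, if_neg hwu]
      exact hQ1 w h0 h1

-- ---- B's stack loop produces the discovery order kdPre ----

theorem kd_preF_cons (roads : List (List Int)) (g : Nat) (u p : Int) :
    ∃ t, kdPreF roads g u p = (u, p) :: t := by
  cases g <;> simp [kdPreF]

theorem kd_pre_len (roads : List (List Int)) :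
    ∀ (g : Nat) (u p : Int), (kdPreF roads g u p).length ≤ (2 * roads.length + 1) ^ g := by
  intro g
  induction g with
  | zero => intro u p; simp [kdPreF]
  | succ g ih =>
    intro u p
    have hlen : (kdPreF roads (g + 1) u p).length =
        1 + ((kdCh roads u).reverse.map (fun v => (kdPreF roads g v u).length)).sum := by
      simp [kdPreF, List.length_flatMap]
      omega
    have hbound : ∀ x ∈ (kdCh roads u).reverse.map (fun v => (kdPreF roads g v u).length),
        x ≤ (2 * roads.length + 1) ^ g := by
      intro x hx
      rw [List.mem_map] at hx
      obtain ⟨v, _, rfl⟩ := hx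
      exact ih v u
    have hsum := List.sum_le_card_nsmul _ _ hbound
    have hch : (kdCh roads u).length ≤ 2 * roads.length :=
      le_trans (List.length_filter_le _ _) (kd_nbrs_len roads u)
    have hmul : ((kdCh roads u).reverse.map (fun v => (kdPreF roads g v u).length)).length •
          (2 * roads.length + 1) ^ g ≤ (2 * roads.length) * (2 * roads.length + 1) ^ g := by
      simp only [List.length_map, List.length_reverse, smul_eq_mul]
      exact Nat.mul_le_mul_right _ hch
    have hpow : 1 ≤ (2 * roads.length + 1) ^ g := Nat.one_le_pow _ _ (by omega)
    have hp : (2 * roads.length + 1) ^ (g + 1) =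
        (2 * roads.length) * (2 * roads.length + 1) ^ g + (2 * roads.length + 1) ^ g := by
      rw [pow_succ]
      ring
    omega

theorem kd_foldl_prepend {u p : Int} (l : List Int) (st : List (Int × Int)) :
    l.foldl (fun st v => if v ≠ p then (v, u) :: st else st) st =
      ((l.filter (fun v => decide (v ≠ p))).reverse.map (fun v => (v, u))) ++ st := by
  induction l generalizing st with
  | nil => simp
  | cons x xs ih =>
    by_cases hx : x ≠ p
    · rw [List.foldl_cons, if_pos hx, ih]
      simp [hx]
    · rw [List.foldl_cons, if_neg hx, ih]
      simp [hx]

theorem kd_loopB_spec {n : Int} {roads : List (List Int)} (h : Pre_kingdomDivision n roads) :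
    ∀ (f : Nat) (stack order : List (Int × Int)),
      (∀ s ∈ stack, kdGood roads s.1 s.2) →
      (stack.map (fun s => (kdPre roads s.1 s.2).length)).sum ≤ f →
      kdLoopB (kdAdjB roads) f stack order =
        order ++ stack.flatMap (fun s => kdPre roads s.1 s.2) := by
  intro f
  induction f with
  | zero =>
    intro stack order hgood hsum
    cases stack with
    | nil => simp [kdLoopB]
    | cons s rest =>
      exfalso
      obtain ⟨t, ht⟩ := kd_preF_cons roads (pvK roads + 1 - pvLv roads s.1) s.1 s.2
      have : (kdPre roads s.1 s.2).length ≥ 1 := by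
        rw [kdPre, ht]; simp
      simp only [List.map_cons, List.sum_cons] at hsum
      omega
  | succ f ih =>
    intro stack order hgood hsum
    cases stack with
    | nil => simp [kdLoopB]
    | cons s rest =>
      obtain ⟨u, p⟩ := s
      have hg : kdGood roads u p := hgood (u, p) List.mem_cons_self
      have hunf : kdLoopB (kdAdjB roads) (f + 1) ((u, p) :: rest) order =
          kdLoopB (kdAdjB roads) f
            (((kdAdjB roads).getD u []).foldl
              (fun st v => if v ≠ p then (v, u) :: st else st) rest)
            (order ++ [(u, p)]) := by simp only [kdLoopB]
      rw [hunf, kd_adjB_getD, kd_foldl_prepend, kd_children_eq h hg]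
      have hpush : ∀ s ∈ (kdCh roads u).reverse.map (fun v => (v, u)) ++ rest,
          kdGood roads s.1 s.2 := by
        intro s hs
        rw [List.mem_append] at hs
        rcases hs with hs | hs
        · rw [List.mem_map] at hs
          obtain ⟨v, hv, rfl⟩ := hs
          rw [List.mem_reverse] at hv
          exact kd_ch_good h hg hv
        · exact hgood s (List.mem_cons_of_mem _ hs)
      have hlen : (kdPre roads u p).length =
          1 + ((kdCh roads u).map (fun v => (kdPre roads v u).length)).sum := by
        rw [kd_pre_unfold h hg]
        simp [List.length_flatMap]
        omega
      have hsum' : ((((kdCh roads u).reverse.map (fun v => (v, u))) ++ rest).map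
          (fun s => (kdPre roads s.1 s.2).length)).sum ≤ f := by
        simp only [List.map_append, List.sum_append, List.map_map, Function.comp_def]
        simp only [List.map_cons, List.sum_cons] at hsum
        have hrev : ((kdCh roads u).reverse.map
            (fun v => (kdPre roads v u).length)).sum =
            ((kdCh roads u).map (fun v => (kdPre roads v u).length)).sum := by
          rw [List.map_reverse, List.sum_reverse]
        rw [hrev]
        omega
      rw [ih _ _ hpush hsum']
      simp only [List.flatMap_cons, List.flatMap_append, List.flatMap_map]
      rw [kd_pre_unfold h hg]
      simp [List.append_assoc]

-- ---- B's reverse-order processing computes kdVal ----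

def kdGT (roads : List (List Int))
    (st : PySem.Dict Int (Int × Int) × PySem.Dict Int (Int × Int)) : Prop :=
  ∀ w : Int, (st.1.get? w = none ∧ st.2.get? w = none) ∨
    (st.1.get? w = some (kdVal roads w).1 ∧ st.2.get? w = some (kdVal roads w).2)

theorem kd_mod_add_self (x : Int) : PySem.Int.mod (x + kdMOD) kdMOD = PySem.Int.mod x kdMOD := by
  rw [kdMOD, PySem.Int.mod_eq_emod_of_pos (by norm_num), PySem.Int.mod_eq_emod_of_pos (by norm_num)]
  omega

theorem kd_procStep_val {n : Int} {roads : List (List Int)} (h : Pre_kingdomDivision n roads)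
    {u p : Int} (hg : kdGood roads u p)
    (st : PySem.Dict Int (Int × Int) × PySem.Dict Int (Int × Int))
    (hch : ∀ v ∈ kdCh roads u,
      st.1.get? v = some (kdVal roads v).1 ∧ st.2.get? v = some (kdVal roads v).2) :
    kdProcStep roads st (u, p) =
      (st.1.insert u (kdVal roads u).1, st.2.insert u (kdVal roads u).2) := by
  -- the four scalar folds
  have hacc : ((kdAdjB roads).getD u []).foldl (fun (t : Int × Int × Int × Int) v =>
      if v ≠ p then
        let dv := (st.2.get? v).getD (0, 0)
        let sv := (st.1.get? v).getD (0, 0)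
        (PySem.Int.mod (t.1 * dv.2) kdMOD,
         PySem.Int.mod (t.2.1 * dv.1) kdMOD,
         PySem.Int.mod (t.2.2.1 * (sv.1 + dv.2 + dv.1)) kdMOD,
         PySem.Int.mod (t.2.2.2 * (sv.2 + dv.2 + dv.1)) kdMOD)
      else t) (1, 1, 1, 1) =
      ((kdCh roads u).foldl (fun a v => PySem.Int.mod (a * (kdVal roads v).2.2) kdMOD) 1,
       (kdCh roads u).foldl (fun a v => PySem.Int.mod (a * (kdVal roads v).2.1) kdMOD) 1,
       (kdCh roads u).foldl (fun a v =>
         PySem.Int.mod (a * ((kdVal roads v).1.1 + (kdVal roads v).2.2 + (kdVal roads v).2.1)) kdMOD) 1,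
       (kdCh roads u).foldl (fun a v =>
         PySem.Int.mod (a * ((kdVal roads v).1.2 + (kdVal roads v).2.2 + (kdVal roads v).2.1)) kdMOD) 1) := by
    rw [kd_adjB_getD,
      PySem.List.foldl_ite_eq_foldl_filter (fun v => v ≠ p) _ _ _,
      kd_children_eq h hg,
      PySem.List.foldl_congr_mem _ _ (fun (t : Int × Int × Int × Int) v =>
        (PySem.Int.mod (t.1 * (kdVal roads v).2.2) kdMOD,
         PySem.Int.mod (t.2.1 * (kdVal roads v).2.1) kdMOD,
         PySem.Int.mod (t.2.2.1 * ((kdVal roads v).1.1 + (kdVal roads v).2.2 + (kdVal roads v).2.1)) kdMOD,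
         PySem.Int.mod (t.2.2.2 * ((kdVal roads v).1.2 + (kdVal roads v).2.2 + (kdVal roads v).2.1)) kdMOD)) _
        (by
          intro acc v hv
          obtain ⟨h1, h2⟩ := hch v hv
          simp [h1, h2]),
      PySem.List.foldl_prod_mk
        (f := fun a v => PySem.Int.mod (a * (kdVal roads v).2.2) kdMOD)
        (g := fun (s : Int × Int × Int) v =>
          (PySem.Int.mod (s.1 * (kdVal roads v).2.1) kdMOD,
           PySem.Int.mod (s.2.1 * ((kdVal roads v).1.1 + (kdVal roads v).2.2 + (kdVal roads v).2.1)) kdMOD,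
           PySem.Int.mod (s.2.2 * ((kdVal roads v).1.2 + (kdVal roads v).2.2 + (kdVal roads v).2.1)) kdMOD)),
      PySem.List.foldl_prod_mk
        (f := fun a v => PySem.Int.mod (a * (kdVal roads v).2.1) kdMOD)
        (g := fun (s : Int × Int) v =>
          (PySem.Int.mod (s.1 * ((kdVal roads v).1.1 + (kdVal roads v).2.2 + (kdVal roads v).2.1)) kdMOD,
           PySem.Int.mod (s.2 * ((kdVal roads v).1.2 + (kdVal roads v).2.2 + (kdVal roads v).2.1)) kdMOD)),
      PySem.List.foldl_prod_mk
        (f := fun a v =>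
          PySem.Int.mod (a * ((kdVal roads v).1.1 + (kdVal roads v).2.2 + (kdVal roads v).2.1)) kdMOD)
        (g := fun (a : Int) v =>
          PySem.Int.mod (a * ((kdVal roads v).1.2 + (kdVal roads v).2.2 + (kdVal roads v).2.1)) kdMOD)]
  have hvalu := kd_val_eq h hg
  show (st.1.insert u _, st.2.insert u _) = _
  rw [hacc, hvalu]
  simp only [kd_mod_add_self]

theorem kd_procB_spec {n : Int} {roads : List (List Int)} (h : Pre_kingdomDivision n roads) :
    ∀ (g : Nat) (u p : Int) st,
      kdGood roads u p → pvK roads + 1 ≤ pvLv roads u + g → kdGT roads st →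
      kdGT roads ((kdPreF roads g u p).foldr
        (fun x st => kdProcStep roads st x) st) ∧
      ((kdPreF roads g u p).foldr (fun x st => kdProcStep roads st x) st).1.get? u
        = some (kdVal roads u).1 ∧
      ((kdPreF roads g u p).foldr (fun x st => kdProcStep roads st x) st).2.get? u
        = some (kdVal roads u).2 ∧
      (∀ w x, st.1.get? w = some x →
        ((kdPreF roads g u p).foldr (fun x st => kdProcStep roads st x) st).1.get? w = some x) ∧
      (∀ w x, st.2.get? w = some x →
        ((kdPreF roads g u p).foldr (fun x st => kdProcStep roads st x) st).2.get? w = some x) := by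
  intro g
  induction g with
  | zero =>
    intro u p st hg hfuel hGT
    exfalso
    have := kd_lv_le_K roads hg.1
    omega
  | succ g ih =>
    intro u p st hg hfuel hGT
    have hlvK := kd_lv_le_K roads hg.1
    have hsub : ∀ (cs : List Int), (∀ v ∈ cs, v ∈ kdCh roads u) → ∀ st,
        kdGT roads st →
        kdGT roads ((cs.flatMap (fun v => kdPreF roads g v u)).foldr
          (fun x st => kdProcStep roads st x) st) ∧
        (∀ v ∈ cs,
          ((cs.flatMap (fun v => kdPreF roads g v u)).foldr
            (fun x st => kdProcStep roads st x) st).1.get? v = some (kdVal roads v).1 ∧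
          ((cs.flatMap (fun v => kdPreF roads g v u)).foldr
            (fun x st => kdProcStep roads st x) st).2.get? v = some (kdVal roads v).2) ∧
        (∀ w x, st.1.get? w = some x →
          ((cs.flatMap (fun v => kdPreF roads g v u)).foldr
            (fun x st => kdProcStep roads st x) st).1.get? w = some x) ∧
        (∀ w x, st.2.get? w = some x →
          ((cs.flatMap (fun v => kdPreF roads g v u)).foldr
            (fun x st => kdProcStep roads st x) st).2.get? w = some x) := by
      intro cs
      induction cs with
      | nil =>
        intro _ st hGT'
        simp only [List.flatMap_nil, List.foldr_nil]
        exact ⟨hGT', by simp, fun w x hx => hx, fun w x hx => hx⟩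
      | cons c cs' ihc =>
        intro hmem st hGT'
        obtain ⟨hGT1, hpres1, hm1s, hm1d⟩ :=
          ihc (fun v hv => hmem v (List.mem_cons_of_mem _ hv)) st hGT'
        have hcch := hmem c List.mem_cons_self
        have hcg : kdGood roads c u := kd_ch_good h hg hcch
        have hclv := (kd_ch_lv h hg hcch).2
        have hfc : pvK roads + 1 ≤ pvLv roads c + g := by omega
        obtain ⟨hGT2, hc1, hc2, hm2s, hm2d⟩ := ih c u _ hcg hfc hGT1
        simp only [List.flatMap_cons, List.foldr_append]
        refine ⟨hGT2, ?_, ?_, ?_⟩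
        · intro v hv
          rcases List.mem_cons.mp hv with rfl | hv'
          · exact ⟨hc1, hc2⟩
          · obtain ⟨hv1, hv2⟩ := hpres1 v hv'
            exact ⟨hm2s _ _ hv1, hm2d _ _ hv2⟩
        · intro w x hx
          exact hm2s _ _ (hm1s _ _ hx)
        · intro w x hx
          exact hm2d _ _ (hm1d _ _ hx)
    obtain ⟨hGT1, hpres, hms, hmd⟩ := hsub (kdCh roads u).reverse
      (fun v hv => List.mem_reverse.mp hv) st hGT
    simp only [kdPreF, List.foldr_cons]
    have hch : ∀ v ∈ kdCh roads u,
        (((kdCh roads u).reverse.flatMap (fun v => kdPreF roads g v u)).foldr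
          (fun x st => kdProcStep roads st x) st).1.get? v = some (kdVal roads v).1 ∧
        (((kdCh roads u).reverse.flatMap (fun v => kdPreF roads g v u)).foldr
          (fun x st => kdProcStep roads st x) st).2.get? v = some (kdVal roads v).2 :=
      fun v hv => hpres v (List.mem_reverse.mpr hv)
    rw [kd_procStep_val h hg _ hch]
    refine ⟨?_, ?_, ?_, ?_, ?_⟩
    · intro w
      by_cases hw : w = u
      · subst hw
        right
        constructor <;> simp [PySem.Dict.get?_insert_self]
      · rw [PySem.Dict.get?_insert_of_ne _ _ hw, PySem.Dict.get?_insert_of_ne _ _ hw]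
        exact hGT1 w
    · simp [PySem.Dict.get?_insert_self]
    · simp [PySem.Dict.get?_insert_self]
    · intro w x hx
      have hx1 := hms w x hx
      by_cases hw : w = u
      · subst hw
        rcases hGT1 w with ⟨hn1, _⟩ | ⟨hs1, _⟩
        · rw [hx1] at hn1
          cases hn1
        · rw [hx1] at hs1
          rw [PySem.Dict.get?_insert_self]
          rw [← hs1]
      · rw [PySem.Dict.get?_insert_of_ne _ _ hw]
        exact hx1
    · intro w x hx
      have hx1 := hmd w x hx
      by_cases hw : w = u
      · subst hw
        rcases hGT1 w with ⟨_, hn1⟩ | ⟨_, hs1⟩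
        · rw [hx1] at hn1
          cases hn1
        · rw [hx1] at hs1
          rw [PySem.Dict.get?_insert_self]
          rw [← hs1]
      · rw [PySem.Dict.get?_insert_of_ne _ _ hw]
        exact hx1

-- ===== VERDICT (by name: the statement is the Claim_ definition above) =====
theorem kingdomDivision_spec : Claim_equal_kingdomDivision := by
  unfold Claim_equal_kingdomDivision
  intro n roads _ hpre
  unfold Spec_kingdomDivision
  have hn : 1 ≤ n := hpre.1
  have hgroot := kd_good_root hpre
  have hlv1 := kd_lv_one roads
  -- A's side: the dfs leaves (kdVal roads 1).2 at index 1 of the diff array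
  have hfuelA : pvK roads + 1 ≤ pvLv roads 1 + (2 * roads.length + 4) := by
    rw [hlv1, pvK]
    omega
  have hlen : (List.replicate (n + 1).toNat ((0 : Int), (0 : Int))).length = (n + 1).toNat := by
    simp
  obtain ⟨_, _, _, _, hA2⟩ := kd_dfsA_spec hpre (2 * roads.length + 4) 1 (-1)
    (List.replicate (n + 1).toNat ((0 : Int), (0 : Int)))
    (List.replicate (n + 1).toNat ((0 : Int), (0 : Int))) hgroot hfuelA hlen hlen
  have hAval : kingdomDivision n roads =
      PySem.Int.mod ((kdVal roads 1).2.1 + (kdVal roads 1).2.2) kdMOD := by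
    have hdefA : kingdomDivision n roads =
        PySem.Int.mod
          ((kdGet (kdDfsA (kdAdjA roads) (2 * roads.length + 4) 1 (-1)
            (List.replicate (n + 1).toNat ((0 : Int), (0 : Int)))
            (List.replicate (n + 1).toNat ((0 : Int), (0 : Int)))).2 1).1 +
           (kdGet (kdDfsA (kdAdjA roads) (2 * roads.length + 4) 1 (-1)
            (List.replicate (n + 1).toNat ((0 : Int), (0 : Int)))
            (List.replicate (n + 1).toNat ((0 : Int), (0 : Int)))).2 1).2) kdMOD := rfl
    rw [hdefA, hA2]
  -- B's side: the stack loop produces kdPre, the reverse fold fills in kdVal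
  have hfuelB : ((([((1 : Int), (-1 : Int))]).map
      (fun s => (kdPre roads s.1 s.2).length)).sum ≤
      (2 * roads.length + 1) ^ (2 * roads.length + 3) + 1) := by
    have := kd_pre_len roads (pvK roads + 1 - pvLv roads 1) 1 (-1)
    rw [hlv1] at this
    have hK : pvK roads + 1 - 0 = 2 * roads.length + 3 := by rw [pvK]; omega
    rw [hK] at this
    simp only [List.map_cons, List.map_nil, List.sum_cons, List.sum_nil]
    rw [kdPre, hlv1, hK]
    omega
  have horder : kdLoopB (kdAdjB roads)
      ((2 * roads.length + 1) ^ (2 * roads.length + 3) + 1) [(1, -1)] [] =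
      kdPre roads 1 (-1) := by
    rw [kd_loopB_spec hpre _ [(1, -1)] []
      (by intro s hs; simp at hs; rw [hs]; exact hgroot) hfuelB]
    simp
  have hGTe : kdGT roads (PySem.Dict.empty, PySem.Dict.empty) := by
    intro w
    left
    constructor <;> simp [PySem.Dict.get?_empty]
  have hfuelB2 : pvK roads + 1 ≤ pvLv roads 1 + (pvK roads + 1) := by omega
  obtain ⟨_, _, hB2, _, _⟩ := kd_procB_spec hpre (pvK roads + 1) 1 (-1)
    (PySem.Dict.empty, PySem.Dict.empty) hgroot hfuelB2 hGTe
  have hpreF : kdPre roads 1 (-1) = kdPreF roads (pvK roads + 1) 1 (-1) := by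
    rw [kdPre, hlv1]
    norm_num
  have hBval : kingdomDivision_alt n roads =
      PySem.Int.mod ((kdVal roads 1).2.1 + (kdVal roads 1).2.2) kdMOD := by
    have hdefB : kingdomDivision_alt n roads =
        PySem.Int.mod
          (((((kdLoopB (kdAdjB roads) ((2 * roads.length + 1) ^ (2 * roads.length + 3) + 1)
              [(1, -1)] []).reverse.foldl (kdProcStep roads)
              (PySem.Dict.empty, PySem.Dict.empty)).2.get? 1).getD (0, 0)).1 +
           ((((kdLoopB (kdAdjB roads) ((2 * roads.length + 1) ^ (2 * roads.length + 3) + 1)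
              [(1, -1)] []).reverse.foldl (kdProcStep roads)
              (PySem.Dict.empty, PySem.Dict.empty)).2.get? 1).getD (0, 0)).2) kdMOD := rfl
    rw [hdefB, horder, List.foldl_reverse, hpreF, hB2]
    simp
  rw [hAval, hBval]
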